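-- pv_equiv track=rewrite | github.com/lycfyi/community-agent-plugin | plugins/community-agent/lib/storage_base.py | search_message_blocks
-- ===== SOURCE A (Python) =====
-- from typing import List
--
-- def search_message_blocks(content: str, keyword: str) -> List[str]:
--     """Search for messages containing a keyword.
--
--     Parses markdown content into message blocks and filters by keyword.
--
--     Args:
--         content: Full markdown content
--         keyword: Search keyword (case-insensitive)
--
--     Returns:
--         List of matching message blocks
--     """
--     lines = content.split("\n")
--     current_block: List[str] = []
--     blocks: List[str] = []
--     in_message = False
--
--     for line in lines:
--         if line.startswith("### "):
--             # Start of new message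
--             if current_block and in_message:
--                 blocks.append("\n".join(current_block))
--             current_block = [line]
--             in_message = True
--         elif line.startswith("## ") or line.startswith("# "):
--             # Date header or file header - end current block
--             if current_block and in_message:
--                 blocks.append("\n".join(current_block))
--             current_block = []
--             in_message = False
--         elif in_message:
--             current_block.append(line)
--
--     # Don't forget the last block
--     if current_block and in_message:
--         blocks.append("\n".join(current_block))
--
--     # Filter by keyword
--     keyword_lower = keyword.lower()
--     return [block for block in blocks if keyword_lower in block.lower()]
-- ===== SOURCE B (Python) =====
-- def search_message_blocks(content, keyword):
--     """Two-pointer scan: jump from one '### ' header to the next boundary and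
--     slice the block out directly, filtering inline (no flush state machine)."""
--     lines = content.split("\n")
--     kw = keyword.lower()
--
--     def is_header(line):
--         return line.startswith("### ") or line.startswith("## ") or line.startswith("# ")
--
--     out = []
--     i = 0
--     n = len(lines)
--     while i < n:
--         if lines[i].startswith("### "):
--             j = i + 1
--             while j < n and not is_header(lines[j]):
--                 j += 1
--             block = "\n".join(lines[i:j])
--             if kw in block.lower():
--                 out.append(block)
--             i = j
--         else:
--             i += 1
--     return out
-- ===== Notes on version B (the rewrite author's own statement) =====
-- stated objective: alternative
-- what changed: Replaces A's flush/in_message state machine (accumulate current_block, flush on each header and at EOF, then a separate filter pass) with a two-pointer scan that jumps from each '### ' header to the next header boundary, slices the block out directly and filters it inline.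
import Mathlib
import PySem

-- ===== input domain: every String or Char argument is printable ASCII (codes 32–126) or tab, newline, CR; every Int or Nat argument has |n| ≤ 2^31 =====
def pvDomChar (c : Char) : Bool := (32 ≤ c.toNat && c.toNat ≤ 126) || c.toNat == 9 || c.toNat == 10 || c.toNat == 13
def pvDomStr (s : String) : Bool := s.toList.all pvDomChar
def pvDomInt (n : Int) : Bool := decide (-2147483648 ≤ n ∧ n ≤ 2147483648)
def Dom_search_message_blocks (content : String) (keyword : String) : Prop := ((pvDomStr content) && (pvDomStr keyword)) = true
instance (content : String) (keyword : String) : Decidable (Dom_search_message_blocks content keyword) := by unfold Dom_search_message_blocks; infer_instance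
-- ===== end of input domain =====

-- B replaces A's flush/in_message state machine by a two-pointer scan that slices each
-- '### '-block out directly and filters it inline (objective: alternative, same cost).

-- ===== PORT A =====
-- 'if current_block and in_message: blocks.append("\n".join(current_block))'
def pvFlush (cb : List String) (bl : List String) (im : Bool) : List String :=
  if !cb.isEmpty && im then bl ++ [PySem.Str.join "\n" cb] else bl

-- the body of A's for-loop; state = (current_block, blocks, in_message)
def pvStepA (s : List String × List String × Bool) (line : String) :
    List String × List String × Bool :=
  if PySem.Str.startswith line "### " then
    ([line], pvFlush s.1 s.2.1 s.2.2, true)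
  else if PySem.Str.startswith line "## " || PySem.Str.startswith line "# " then
    ([], pvFlush s.1 s.2.1 s.2.2, false)
  else if s.2.2 then (s.1 ++ [line], s.2.1, s.2.2)
  else s

def search_message_blocks (content : String) (keyword : String) : List String :=
  let lines := ((PySem.Str.split? content "\n").getD [])
  let st := lines.foldl pvStepA ([], [], false)
  let blocks := pvFlush st.1 st.2.1 st.2.2
  let keyword_lower := PySem.Str.lower keyword
  blocks.filter (fun block => PySem.Str.isIn keyword_lower (PySem.Str.lower block))

-- ===== PORT B =====
def pvIsHeader (line : String) : Bool :=
  PySem.Str.startswith line "### " || PySem.Str.startswith line "## " ||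
    PySem.Str.startswith line "# "

-- the inner while loop of B: advance until the next header, returning (slice, remainder)
def pvSpan : List String → List String × List String
  | [] => ([], [])
  | x :: xs =>
    if pvIsHeader x then ([], x :: xs)
    else
      let p := pvSpan xs
      (x :: p.1, p.2)

theorem pvSpan_len (xs : List String) : (pvSpan xs).2.length ≤ xs.length := by
  induction xs with
  | nil => simp [pvSpan]
  | cons x xs ih =>
    simp only [pvSpan]
    split
    · simp
    · simpa using Nat.le_succ_of_le ih

-- the outer while loop of B
def pvGoB (kw : String) : List String → List String
  | [] => []
  | head :: rest =>
    if PySem.Str.startswith head "### " then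
      let p := pvSpan rest
      let block := PySem.Str.join "\n" (head :: p.1)
      (if PySem.Str.isIn kw (PySem.Str.lower block) then [block] else []) ++ pvGoB kw p.2
    else pvGoB kw rest
termination_by l => l.length
decreasing_by
  · have := pvSpan_len rest; simp; omega
  · simp

def search_message_blocks_alt (content : String) (keyword : String) : List String :=
  pvGoB (PySem.Str.lower keyword) (((PySem.Str.split? content "\n").getD []))

-- ===== PRECONDITION & SPEC =====
def Spec_search_message_blocks (content : String) (keyword : String) (out : List String) : Prop := out = search_message_blocks_alt content keyword
instance (content : String) (keyword : String) (out : List String) : Decidable (Spec_search_message_blocks content keyword out) := by unfold Spec_search_message_blocks; infer_instance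

-- ===== CLAIM (what is proved, stated in full; the proofs are below) =====
def Claim_equal_search_message_blocks : Prop := ∀ (content : String) (keyword : String), Dom_search_message_blocks content keyword → Spec_search_message_blocks content keyword (search_message_blocks content keyword)

-- ===== LEMMAS AND PROOFS =====

-- the unfiltered segments B slices out, as line lists
def pvSegs : List String → List (List String)
  | [] => []
  | l :: rest =>
    if PySem.Str.startswith l "### " then
      (l :: (pvSpan rest).1) :: pvSegs (pvSpan rest).2
    else pvSegs rest
termination_by l => l.length
decreasing_by
  · have := pvSpan_len rest; simp; omega
  · simp

def pvFinish (st : List String × List String × Bool) : List String :=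
  pvFlush st.1 st.2.1 st.2.2

theorem pvFlush_nil (bl : List String) (im : Bool) : pvFlush [] bl im = bl := by
  simp [pvFlush]

theorem pvFlush_true (cb : List String) (bl : List String) (h : cb ≠ []) :
    pvFlush cb bl true = bl ++ [PySem.Str.join "\n" cb] := by
  simp [pvFlush, h]

theorem pvStepA_hdr3 (s : List String × List String × Bool) (l : String)
    (h3 : PySem.Str.startswith l "### " = true) :
    pvStepA s l = ([l], pvFlush s.1 s.2.1 s.2.2, true) := by
  simp at h3; simp [pvStepA, h3]

theorem pvStepA_hdr12 (s : List String × List String × Bool) (l : String)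
    (h3 : PySem.Str.startswith l "### " = false)
    (h2 : (PySem.Str.startswith l "## " || PySem.Str.startswith l "# ") = true) :
    pvStepA s l = ([], pvFlush s.1 s.2.1 s.2.2, false) := by
  simp at h3 h2; simp [pvStepA, h3, h2]

theorem pvStepA_body_true (cb bl : List String) (l : String)
    (h3 : PySem.Str.startswith l "### " = false)
    (h2 : (PySem.Str.startswith l "## " || PySem.Str.startswith l "# ") = false) :
    pvStepA (cb, bl, true) l = (cb ++ [l], bl, true) := by
  simp at h3 h2; simp [pvStepA, h3, h2]

theorem pvStepA_body_false (cb bl : List String) (l : String)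
    (h3 : PySem.Str.startswith l "### " = false)
    (h2 : (PySem.Str.startswith l "## " || PySem.Str.startswith l "# ") = false) :
    pvStepA (cb, bl, false) l = (cb, bl, false) := by
  simp at h3 h2; simp [pvStepA, h3, h2]

theorem pvSpan_hdr (l : String) (rest : List String) (h : pvIsHeader l = true) :
    pvSpan (l :: rest) = ([], l :: rest) := by
  simp [pvSpan, h]

theorem pvSpan_body (l : String) (rest : List String) (h : pvIsHeader l = false) :
    pvSpan (l :: rest) = (l :: (pvSpan rest).1, (pvSpan rest).2) := by
  simp [pvSpan, h]

theorem pvSegs_hdr3 (l : String) (rest : List String)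
    (h3 : PySem.Str.startswith l "### " = true) :
    pvSegs (l :: rest) = (l :: (pvSpan rest).1) :: pvSegs (pvSpan rest).2 := by
  simp at h3; rw [pvSegs]; simp [h3]

theorem pvSegs_other (l : String) (rest : List String)
    (h3 : PySem.Str.startswith l "### " = false) :
    pvSegs (l :: rest) = pvSegs rest := by
  simp at h3; rw [pvSegs]; simp [h3]

-- the loop invariant: A's fold from either state yields exactly B's segments
theorem pvMain (lines : List String) :
    (∀ bl, pvFinish (lines.foldl pvStepA ([], bl, false))
      = bl ++ (pvSegs lines).map (PySem.Str.join "\n"))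
    ∧ (∀ cb bl, cb ≠ [] →
        pvFinish (lines.foldl pvStepA (cb, bl, true))
          = bl ++ PySem.Str.join "\n" (cb ++ (pvSpan lines).1)
              :: (pvSegs (pvSpan lines).2).map (PySem.Str.join "\n")) := by
  induction lines with
  | nil =>
    refine ⟨fun bl => ?_, fun cb bl h => ?_⟩
    · simp [pvFinish, pvSegs, pvFlush_nil]
    · simp [pvFinish, pvSpan, pvSegs, pvFlush_true cb bl h]
  | cons l rest ih =>
    refine ⟨fun bl => ?_, fun cb bl hcb => ?_⟩
    · by_cases h3 : PySem.Str.startswith l "### " = true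
      · rw [List.foldl_cons, pvStepA_hdr3 _ _ h3]
        simp only [pvFlush_nil]
        rw [ih.2 [l] bl (by simp), pvSegs_hdr3 _ _ h3]
        simp
      · rw [List.foldl_cons]
        rw [pvSegs_other _ _ (Bool.not_eq_true _ ▸ h3 : _ = false)]
        by_cases h2 : (PySem.Str.startswith l "## " || PySem.Str.startswith l "# ") = true
        · rw [pvStepA_hdr12 _ _ (by simpa using h3) h2, pvFlush_nil]
          exact ih.1 bl
        · rw [pvStepA_body_false _ _ _ (by simpa using h3) (by simpa using h2)]
          exact ih.1 bl
    · by_cases h3 : PySem.Str.startswith l "### " = true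
      · rw [List.foldl_cons, pvStepA_hdr3 _ _ h3, pvFlush_true cb bl hcb]
        rw [ih.2 [l] _ (by simp)]
        rw [pvSpan_hdr _ _ (by have := h3; simp at this; simp [pvIsHeader, this]), pvSegs_hdr3 _ _ h3]
        simp
      · by_cases h2 : (PySem.Str.startswith l "## " || PySem.Str.startswith l "# ") = true
        · rw [List.foldl_cons, pvStepA_hdr12 _ _ (by simpa using h3) h2,
            pvFlush_true cb bl hcb]
          rw [ih.1]
          rw [pvSpan_hdr _ _ (by have := h2; simp at this; simp [pvIsHeader]; tauto)]
          rw [pvSegs_other _ _ (by simpa using h3)]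
          simp
        · rw [List.foldl_cons, pvStepA_body_true _ _ _ (by simpa using h3) (by simpa using h2)]
          rw [ih.2 (cb ++ [l]) bl (by simp)]
          have hl : pvIsHeader l = false := by
            have t3 := h3; have t2 := h2
            simp at t3 t2
            simp [pvIsHeader, t3, t2.1, t2.2]
          rw [pvSpan_body _ _ hl]
          simp

-- B's loop is the filtered-join of the segments
theorem pvGoB_eq (kw : String) : ∀ (n : ℕ) (lines : List String), lines.length ≤ n →
    pvGoB kw lines
      = ((pvSegs lines).map (PySem.Str.join "\n")).filter
          (fun b => PySem.Str.isIn kw (PySem.Str.lower b)) := by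
  intro n
  induction n with
  | zero =>
    intro lines h
    have : lines = [] := List.eq_nil_of_length_eq_zero (Nat.le_zero.mp h)
    subst this; simp [pvGoB, pvSegs]
  | succ n ih =>
    intro lines h
    match lines with
    | [] => simp [pvGoB, pvSegs]
    | l :: rest =>
      by_cases h3 : PySem.Str.startswith l "### " = true
      · rw [pvGoB, pvSegs_hdr3 _ _ h3]
        simp only [h3, if_pos]
        rw [ih (pvSpan rest).2 (by have := pvSpan_len rest; simp at h; omega)]
        simp only [List.map_cons, List.filter_cons]
        split <;> simp
      · rw [pvGoB, pvSegs_other _ _ (by simpa using h3)]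
        simp only [h3, Bool.false_eq_true, reduceIte]
        exact ih rest (by simp at h; omega)

-- ===== VERDICT (by name: the statement is the Claim_ definition above) =====
theorem search_message_blocks_spec : Claim_equal_search_message_blocks := by
  intro content keyword _
  unfold Spec_search_message_blocks search_message_blocks search_message_blocks_alt
  have h := (pvMain (((PySem.Str.split? content "\n").getD []))).1 []
  simp only [pvFinish] at h
  simp only [h, List.nil_append]
  rw [pvGoB_eq (PySem.Str.lower keyword) (((PySem.Str.split? content "\n").getD [])).length _ le_rfl]
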